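-- pv_equiv track=rewrite | github.com/synaptent/aragora | scripts/auto_revert_main_required_failures.py | evaluate_required_contexts
-- ===== SOURCE A (Python) =====
-- from typing import Any
--
-- PASS_CONCLUSIONS = {"success", "neutral", "skipped"}
--
-- def select_latest_check_runs(check_runs: list[dict[str, Any]]) -> dict[str, dict[str, Any]]:
--     """Select latest check run per context name."""
--     latest: dict[str, dict[str, Any]] = {}
--     for run in check_runs:
--         name = str(run.get("name", "")).strip()
--         if not name:
--             continue
--         run_id = int(run.get("id", 0) or 0)
--         current = latest.get(name)
--         if current is None or int(current.get("id", 0) or 0) < run_id: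
--             latest[name] = run
--     return latest
--
-- def evaluate_required_contexts(
--     required_contexts: list[str],
--     check_runs: list[dict[str, Any]],
-- ) -> dict[str, list[str]]:
--     """Classify required contexts into passed/pending/failed/missing buckets."""
--     latest = select_latest_check_runs(check_runs)
--     passed: list[str] = []
--     pending: list[str] = []
--     failed: list[str] = []
--     missing: list[str] = []
--
--     for context in required_contexts:
--         run = latest.get(context)
--         if run is None:
--             missing.append(context)
--             continue
--         status = str(run.get("status", "")).strip().lower()
--         conclusion = str(run.get("conclusion", "")).strip().lower()
--         if status != "completed" or not conclusion:
--             pending.append(context)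
--             continue
--         if conclusion in PASS_CONCLUSIONS:
--             passed.append(context)
--         else:
--             failed.append(f"{context}:{conclusion}")
--
--     return {"passed": passed, "pending": pending, "failed": failed, "missing": missing}
-- ===== SOURCE B (Python) =====
-- PASS_CONCLUSIONS = {"success", "neutral", "skipped"}
--
--
-- def evaluate_required_contexts(required_contexts, check_runs):
--     """Classify required contexts into passed/pending/failed/missing buckets.
--
--     Staged decomposition: map every context to a (bucket, text) label by
--     filtering check_runs for its candidates and taking the max-id run
--     (Python max keeps the earliest on ties), then gather each bucket by a
--     filter over the label list.  No latest-run index is ever built.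
--     """
--
--     def run_id(run):
--         return int(run.get("id", 0) or 0)
--
--     def label(context):
--         cands = [r for r in check_runs
--                  if str(r.get("name", "")).strip() == context
--                  and str(r.get("name", "")).strip()]
--         if not cands:
--             return ("missing", context)
--         best = max(cands, key=run_id)
--         status = str(best.get("status", "")).strip().lower()
--         conclusion = str(best.get("conclusion", "")).strip().lower()
--         if status != "completed" or not conclusion:
--             return ("pending", context)
--         if conclusion in PASS_CONCLUSIONS:
--             return ("passed", context)
--         return ("failed", f"{context}:{conclusion}")
--
--     labels = [label(c) for c in required_contexts]
--     return {key: [text for bucket, text in labels if bucket == key]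
--             for key in ("passed", "pending", "failed", "missing")}
-- ===== Notes on version B (the rewrite author's own statement) =====
-- stated objective: alternative
-- what changed: Replaces A's build-latest-index-then-single-fold-into-four-accumulators with a staged map/filter pipeline: each context is mapped to a (bucket,text) label via filter-candidates + max(key=id), and the four buckets are gathered by filtering the label list; no dict index and no accumulator tuple.
import Mathlib
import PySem

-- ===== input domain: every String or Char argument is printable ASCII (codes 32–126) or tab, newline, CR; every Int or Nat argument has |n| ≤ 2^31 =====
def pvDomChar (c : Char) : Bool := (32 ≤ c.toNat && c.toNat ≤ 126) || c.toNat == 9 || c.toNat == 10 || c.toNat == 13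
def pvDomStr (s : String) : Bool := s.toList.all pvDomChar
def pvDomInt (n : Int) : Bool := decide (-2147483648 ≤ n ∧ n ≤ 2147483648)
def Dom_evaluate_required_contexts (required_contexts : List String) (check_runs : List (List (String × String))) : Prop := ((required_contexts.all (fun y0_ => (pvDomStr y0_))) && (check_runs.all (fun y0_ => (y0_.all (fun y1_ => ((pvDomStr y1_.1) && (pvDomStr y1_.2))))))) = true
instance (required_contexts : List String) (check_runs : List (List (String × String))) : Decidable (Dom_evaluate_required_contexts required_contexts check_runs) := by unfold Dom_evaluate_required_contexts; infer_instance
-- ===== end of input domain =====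

-- B replaces A's latest-run index + single four-accumulator fold by a staged pipeline
-- (map each context to a (bucket, text) label via filter + max-by-id, then gather each
-- bucket by filtering the labels); objective: alternative decomposition, same results.

-- shared primitive accesses of the Python dicts (both sources perform these literally)
-- run.get(k, default): first-match lookup in the association list (Python dict)
def pvLookup (run : List (String × String)) (k : String) : Option String :=
  match run with
  | [] => none
  | (a, b) :: rest => if a == k then some b else pvLookup rest k

-- int(run.get("id", 0) or 0); `.getD 0` is exact under Pre_ (ofStr? succeeds there)
def pvRunId (run : List (String × String)) : Int :=
  match pvLookup run "id" with
  | none => 0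
  | some s => if s = "" then 0 else (PySem.Int.ofStr? s).getD 0

-- str(run.get("name", "")).strip()
def pvRunName (run : List (String × String)) : String :=
  PySem.Str.strip ((pvLookup run "name").getD "")

-- str(run.get(k, "")).strip().lower()
def pvField (run : List (String × String)) (k : String) : String :=
  PySem.Str.lower (PySem.Str.strip ((pvLookup run k).getD ""))

-- ===== PORT A =====

def select_latest_check_runs (check_runs : List (List (String × String))) :
    PySem.Dict String (List (String × String)) :=
  check_runs.foldl
    (fun latest run =>
      let name := pvRunName run
      if name = "" then latest
      else
        match latest.get? name with
        | none => latest.insert name run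
        | some current =>
            if pvRunId current < pvRunId run then latest.insert name run else latest)
    PySem.Dict.empty

def evaluate_required_contexts (required_contexts : List String) (check_runs : List (List (String × String))) : List (String × List String) :=
  let latest := select_latest_check_runs check_runs
  let st := required_contexts.foldl
    (fun st context =>
      match latest.get? context with
      | none => (st.1, st.2.1, st.2.2.1, st.2.2.2 ++ [context])
      | some run =>
          let status := pvField run "status"
          let conclusion := pvField run "conclusion"
          if status ≠ "completed" ∨ conclusion = "" then
            (st.1, st.2.1 ++ [context], st.2.2.1, st.2.2.2)
          else if conclusion = "success" ∨ conclusion = "neutral" ∨ conclusion = "skipped" then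
            (st.1 ++ [context], st.2.1, st.2.2.1, st.2.2.2)
          else (st.1, st.2.1, st.2.2.1 ++ [context ++ ":" ++ conclusion], st.2.2.2))
    ([], [], [], [])
  [("passed", st.1), ("pending", st.2.1), ("failed", st.2.2.1), ("missing", st.2.2.2)]

-- ===== PORT B =====

-- label(context): candidates by filter, best by max(key=run_id), then classify
def pvBLabel (check_runs : List (List (String × String))) (context : String) : String × String :=
  let cands := check_runs.filter
    (fun run => pvRunName run == context && !(pvRunName run == ""))
  match PySem.List.max? cands pvRunId with
  | none => ("missing", context)
  | some best =>
      let status := pvField best "status"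
      let conclusion := pvField best "conclusion"
      if status ≠ "completed" ∨ conclusion = "" then ("pending", context)
      else if conclusion = "success" ∨ conclusion = "neutral" ∨ conclusion = "skipped" then
        ("passed", context)
      else ("failed", context ++ ":" ++ conclusion)

-- [text for bucket, text in labels if bucket == key]
def pvBucket (key : String) (labels : List (String × String)) : List String :=
  labels.filterMap (fun p => if p.1 = key then some p.2 else none)

def evaluate_required_contexts_alt (required_contexts : List String) (check_runs : List (List (String × String))) : List (String × List String) :=
  let labels := required_contexts.map (pvBLabel check_runs)
  ["passed", "pending", "failed", "missing"].map (fun key => (key, pvBucket key labels))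

-- ===== PRECONDITION & SPEC =====
-- Pre_ excludes exactly the inputs on which A raises ValueError: a check run whose
-- stripped name is nonempty but whose "id" value is a nonempty string int() rejects.
def Pre_evaluate_required_contexts (_required_contexts : List String) (check_runs : List (List (String × String))) : Prop :=
  ∀ run ∈ check_runs, pvRunName run ≠ "" →
    (pvLookup run "id").getD "0" = "" ∨ (PySem.Int.ofStr? ((pvLookup run "id").getD "0")).isSome
instance (required_contexts : List String) (check_runs : List (List (String × String))) : Decidable (Pre_evaluate_required_contexts required_contexts check_runs) := by unfold Pre_evaluate_required_contexts; infer_instance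

def pvWitness_evaluate_required_contexts : List String × (List (List (String × String))) :=
  (["a", "b"], [[("name", "a"), ("id", "1"), ("status", "completed"), ("conclusion", "success")]])

def Spec_evaluate_required_contexts (required_contexts : List String) (check_runs : List (List (String × String))) (out : List (String × List String)) : Prop := out = evaluate_required_contexts_alt required_contexts check_runs
instance (required_contexts : List String) (check_runs : List (List (String × String))) (out : List (String × List String)) : Decidable (Spec_evaluate_required_contexts required_contexts check_runs out) := by unfold Spec_evaluate_required_contexts; infer_instance

-- ===== CLAIM (what is proved, stated in full; the proofs are below) =====
def Claim_equal_evaluate_required_contexts : Prop := ∀ (required_contexts : List String) (check_runs : List (List (String × String))), Dom_evaluate_required_contexts required_contexts check_runs → Pre_evaluate_required_contexts required_contexts check_runs → Spec_evaluate_required_contexts required_contexts check_runs (evaluate_required_contexts required_contexts check_runs)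

-- ===== LEMMAS AND PROOFS =====

-- A's index dict, looked up at c, runs the keep-first-maximum fold over exactly the
-- runs whose stripped name equals c (and is nonempty)
theorem get?_select_latest_fold (c : String) (l : List (List (String × String)))
    (d : PySem.Dict String (List (String × String))) :
    (l.foldl
      (fun latest run =>
        let name := pvRunName run
        if name = "" then latest
        else
          match latest.get? name with
          | none => latest.insert name run
          | some current =>
              if pvRunId current < pvRunId run then latest.insert name run else latest) d).get? c
    =
    l.foldl
      (fun acc run =>
        if pvRunName run == c && !(pvRunName run == "") then
          match acc with
          | none => some run
          | some m => if pvRunId m < pvRunId run then some run else some m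
        else acc) (d.get? c) := by
  induction l generalizing d with
  | nil => rfl
  | cons run rest ih =>
      simp only [List.foldl_cons]
      by_cases hne : pvRunName run = ""
      · rw [if_pos hne, ih]
        simp [hne]
      · by_cases hc : pvRunName run = c
        · subst hc
          cases hcur : d.get? (pvRunName run) with
          | none =>
              rw [if_neg hne, ih]
              simp [PySem.Dict.get?_insert_self, hne]
          | some current =>
              rw [if_neg hne, ih]
              by_cases hlt : pvRunId current < pvRunId run
              · simp [PySem.Dict.get?_insert_self, hne, hlt]
              · simp [hne, hcur, hlt]
        · cases hcur : d.get? (pvRunName run) with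
          | none =>
              rw [if_neg hne, ih]
              simp [PySem.Dict.get?_insert_of_ne d run (Ne.symm hc), hc]
          | some current =>
              rw [if_neg hne, ih]
              by_cases hlt : pvRunId current < pvRunId run
              · simp [hlt, PySem.Dict.get?_insert_of_ne d run (Ne.symm hc), hc]
              · simp [hlt, hc]

-- …and that fold is B's max? over the filtered candidate list
theorem get?_select_latest (c : String) (check_runs : List (List (String × String))) :
    (select_latest_check_runs check_runs).get? c
      = PySem.List.max?
          (check_runs.filter (fun run => pvRunName run == c && !(pvRunName run == "")))
          pvRunId := by
  unfold select_latest_check_runs PySem.List.max?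
  rw [get?_select_latest_fold, PySem.Dict.get?_empty, List.foldl_filter]
  congr 1
  funext acc run
  split_ifs with h
  · cases acc <;> rfl
  · rfl

-- A's four-accumulator fold appends exactly B's four buckets of the label list
theorem fold_eq_buckets (check_runs : List (List (String × String)))
    (rcs : List String) (st : List String × List String × List String × List String) :
    rcs.foldl
      (fun st context =>
        match (select_latest_check_runs check_runs).get? context with
        | none => (st.1, st.2.1, st.2.2.1, st.2.2.2 ++ [context])
        | some run =>
            let status := pvField run "status"
            let conclusion := pvField run "conclusion"
            if status ≠ "completed" ∨ conclusion = "" then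
              (st.1, st.2.1 ++ [context], st.2.2.1, st.2.2.2)
            else if conclusion = "success" ∨ conclusion = "neutral" ∨ conclusion = "skipped" then
              (st.1 ++ [context], st.2.1, st.2.2.1, st.2.2.2)
            else (st.1, st.2.1, st.2.2.1 ++ [context ++ ":" ++ conclusion], st.2.2.2)) st
    = (st.1 ++ pvBucket "passed" (rcs.map (pvBLabel check_runs)),
       st.2.1 ++ pvBucket "pending" (rcs.map (pvBLabel check_runs)),
       st.2.2.1 ++ pvBucket "failed" (rcs.map (pvBLabel check_runs)),
       st.2.2.2 ++ pvBucket "missing" (rcs.map (pvBLabel check_runs))) := by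
  induction rcs generalizing st with
  | nil => simp [pvBucket]
  | cons c rest ih =>
      simp only [List.foldl_cons, List.map_cons]
      rw [ih]
      rw [get?_select_latest c check_runs]
      unfold pvBLabel
      cases hm : PySem.List.max?
          (check_runs.filter (fun run => pvRunName run == c && !(pvRunName run == ""))) pvRunId with
      | none => simp [hm, pvBucket]
      | some best =>
          by_cases h1 : pvField best "status" ≠ "completed" ∨ pvField best "conclusion" = ""
          · simp [hm, h1, pvBucket]
          · by_cases h2 : pvField best "conclusion" = "success" ∨
                pvField best "conclusion" = "neutral" ∨ pvField best "conclusion" = "skipped"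
            · simp [hm, h1, h2, pvBucket]
            · simp [hm, h1, h2, pvBucket]

-- ===== VERDICT (by name: the statement is the Claim_ definition above) =====
theorem evaluate_required_contexts_spec : Claim_equal_evaluate_required_contexts := by
  intro required_contexts check_runs _ _
  unfold Spec_evaluate_required_contexts evaluate_required_contexts evaluate_required_contexts_alt
  simp only [fold_eq_buckets]
  simp [pvBucket]
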